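-- pv_equiv track=rewrite | github.com/falconbi/tm1_cubemap | cube_map/extract_tm1_model.py | analyse_rules
-- ===== SOURCE A (Python) =====
-- def analyse_rules(rules_text: str) -> dict:
--     """Count rules metrics for complexity scoring."""
--     if not rules_text:
--         return {
--             "total": 0,
--             "lines": 0,
--             "comments": 0,
--             "dbRefs": 0,
--             "feeders": 0,
--             "ifs": 0,
--             "stet": 0,
--             "skip": 0,
--         }
--
--     all_lines = rules_text.split("\n")
--     total = len(all_lines)
--     comments = sum(1 for l in all_lines if l.strip().startswith("#"))
--     blanks = sum(1 for l in all_lines if l.strip() == "")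
--     rule_lines = total - comments - blanks
--     upper = rules_text.upper()
--
--     return {
--         "total": total,
--         "lines": rule_lines,
--         "comments": comments,
--         "dbRefs": upper.count("DB("),
--         "feeders": sum(1 for l in all_lines if "FEEDERS" in l.upper()),
--         "ifs": upper.count("\nIF(") + (1 if upper.startswith("IF(") else 0),
--         "stet": upper.count("STET"),
--         "skip": upper.count("SKIP"),
--     }
-- ===== SOURCE B (Python) =====
-- def analyse_rules(rules_text: str) -> dict:
--     """Count rules metrics for complexity scoring (single pass over the lines)."""
--     if not rules_text:
--         return {
--             "total": 0,
--             "lines": 0,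
--             "comments": 0,
--             "dbRefs": 0,
--             "feeders": 0,
--             "ifs": 0,
--             "stet": 0,
--             "skip": 0,
--         }
--
--     total = comments = blanks = db_refs = feeders = ifs = stet = skip = 0
--     for line in rules_text.split("\n"):
--         total += 1
--         s = line.strip()
--         u = line.upper()
--         if s.startswith("#"):
--             comments += 1
--         if s == "":
--             blanks += 1
--         if "FEEDERS" in u:
--             feeders += 1
--         if u.startswith("IF("):
--             ifs += 1
--         db_refs += u.count("DB(")
--         stet += u.count("STET")
--         skip += u.count("SKIP")
--
--     return {
--         "total": total,
--         "lines": total - comments - blanks,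
--         "comments": comments,
--         "dbRefs": db_refs,
--         "feeders": feeders,
--         "ifs": ifs,
--         "stet": stet,
--         "skip": skip,
--     }
-- ===== Notes on version B (the rewrite author's own statement) =====
-- stated objective: alternative
-- what changed: A makes eight separate passes (split plus per-metric generator sums and whole-text substring counts); B makes a single pass over the split lines maintaining all eight counters at once, counting substrings per line and detecting the newline-anchored IF occurrences as lines whose uppercased text starts with the IF keyword.
import Mathlib
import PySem

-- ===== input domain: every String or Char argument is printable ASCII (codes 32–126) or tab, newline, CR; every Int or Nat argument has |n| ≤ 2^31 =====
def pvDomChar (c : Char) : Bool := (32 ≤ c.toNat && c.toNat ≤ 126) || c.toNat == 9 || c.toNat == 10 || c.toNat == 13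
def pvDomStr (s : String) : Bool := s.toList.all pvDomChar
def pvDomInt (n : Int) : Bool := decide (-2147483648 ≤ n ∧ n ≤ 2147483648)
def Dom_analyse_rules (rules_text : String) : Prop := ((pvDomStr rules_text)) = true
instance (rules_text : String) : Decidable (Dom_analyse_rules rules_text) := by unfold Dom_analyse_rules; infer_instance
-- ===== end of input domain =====

-- B replaces A's eight separate passes (split + per-metric generator sums + whole-text substring
-- counts) by ONE pass over the split lines maintaining all counters at once; '\nIF(' occurrences
-- become lines that start with "IF(".  Objective: alternative decomposition (same O(n) cost).

-- ===== PORT A =====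
def analyse_rules (rules_text : String) : List (String × Int) :=
  if rules_text = "" then
    [("total", 0), ("lines", 0), ("comments", 0), ("dbRefs", 0),
     ("feeders", 0), ("ifs", 0), ("stet", 0), ("skip", 0)]
  else
    let all_lines := (PySem.Str.split? rules_text "\n").getD []
    let total : Int := all_lines.length
    let comments : Int :=
      all_lines.countP (fun l => PySem.Str.startswith (PySem.Str.strip l) "#")
    let blanks : Int := all_lines.countP (fun l => PySem.Str.strip l == "")
    let rule_lines : Int := total - comments - blanks
    let upperT := PySem.Str.upper rules_text
    [("total", total),
     ("lines", rule_lines),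
     ("comments", comments),
     ("dbRefs", (PySem.Str.count upperT "DB(" : Int)),
     ("feeders", (all_lines.countP (fun l => PySem.Str.isIn "FEEDERS" (PySem.Str.upper l)) : Int)),
     ("ifs", (PySem.Str.count upperT "\nIF(" : Int) +
             (if PySem.Str.startswith upperT "IF(" then 1 else 0)),
     ("stet", (PySem.Str.count upperT "STET" : Int)),
     ("skip", (PySem.Str.count upperT "SKIP" : Int))]

-- ===== PORT B =====
def analyse_rules_alt (rules_text : String) : List (String × Int) :=
  if rules_text = "" then
    [("total", 0), ("lines", 0), ("comments", 0), ("dbRefs", 0),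
     ("feeders", 0), ("ifs", 0), ("stet", 0), ("skip", 0)]
  else
    let st :=
      ((PySem.Str.split? rules_text "\n").getD []).foldl
        (fun (acc : Int × Int × Int × Int × Int × Int × Int × Int) line =>
          let s := PySem.Str.strip line
          let u := PySem.Str.upper line
          (acc.1 + 1,
           acc.2.1 + (if PySem.Str.startswith s "#" then 1 else 0),
           acc.2.2.1 + (if s == "" then 1 else 0),
           acc.2.2.2.1 + (PySem.Str.count u "DB(" : Int),
           acc.2.2.2.2.1 + (if PySem.Str.isIn "FEEDERS" u then 1 else 0),
           acc.2.2.2.2.2.1 + (if PySem.Str.startswith u "IF(" then 1 else 0),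
           acc.2.2.2.2.2.2.1 + (PySem.Str.count u "STET" : Int),
           acc.2.2.2.2.2.2.2 + (PySem.Str.count u "SKIP" : Int)))
        (0, 0, 0, 0, 0, 0, 0, 0)
    match st with
    | (total, comments, blanks, dbRefs, feeders, ifs, stet, skip) =>
      [("total", total),
       ("lines", total - comments - blanks),
       ("comments", comments),
       ("dbRefs", dbRefs),
       ("feeders", feeders),
       ("ifs", ifs),
       ("stet", stet),
       ("skip", skip)]

-- ===== PRECONDITION & SPEC =====
def Spec_analyse_rules (rules_text : String) (out : List (String × Int)) : Prop := out = analyse_rules_alt rules_text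
instance (rules_text : String) (out : List (String × Int)) : Decidable (Spec_analyse_rules rules_text out) := by unfold Spec_analyse_rules; infer_instance

-- ===== CLAIM (what is proved, stated in full; the proofs are below) =====
def Claim_equal_analyse_rules : Prop := ∀ (rules_text : String), Dom_analyse_rules rules_text → Spec_analyse_rules rules_text (analyse_rules rules_text)

-- ===== LEMMAS AND PROOFS =====

-- `cnt p s` = Python's non-overlapping greedy s.count(p), structural form (for p ≠ []).
def cnt (p : List Char) : List Char → Nat
  | [] => 0
  | a :: t => if p.isPrefixOf (a :: t) then 1 + cnt p (t.drop (p.length - 1)) else cnt p t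
termination_by l => l.length
decreasing_by
  · simp only [List.length_drop, List.length_cons]; omega
  · simp only [List.length_cons]; omega

-- `splitC c s` = s.split(c) for a single-character separator, structural form.
def splitC (c : Char) : List Char → List (List Char)
  | [] => [[]]
  | a :: t => if a = c then [] :: splitC c t else (splitC c t).modifyHead (a :: ·)

theorem count_go_eq_cnt (p : List Char) (hp : p ≠ []) :
    ∀ (fuel : Nat) (l : List Char) (acc : Nat), l.length ≤ fuel →
      PySem.Chars.count.go p fuel l acc = acc + cnt p l := by
  intro fuel
  induction fuel with
  | zero =>
    intro l acc hl
    have : l = [] := List.eq_nil_of_length_eq_zero (Nat.le_zero.mp hl)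
    subst this; rw [PySem.Chars.count.go.eq_def]; simp [cnt]
  | succ n ih =>
    intro l acc hl
    match l with
    | [] => rw [PySem.Chars.count.go.eq_def]; simp [cnt]
    | a :: t =>
      rw [PySem.Chars.count.go.eq_def]
      simp only []
      by_cases hpre : p.isPrefixOf (a :: t)
      · rw [if_pos hpre]
        obtain ⟨k, hk⟩ : ∃ k, p.length = k + 1 := by
          cases p with
          | nil => exact absurd rfl hp
          | cons x xs => exact ⟨xs.length, rfl⟩
        have hdrop : List.drop p.length (a :: t) = t.drop (p.length - 1) := by
          rw [hk]; simp [List.drop_succ_cons]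
        rw [hdrop, ih _ _ (by simp [List.length_drop] at *; omega)]
        simp [cnt, hpre]; omega
      · rw [if_neg hpre, ih _ _ (by simp at hl; omega)]
        simp [cnt, hpre]

theorem count_eq_cnt (s p : List Char) (hp : p ≠ []) :
    PySem.Chars.count s p = cnt p s := by
  unfold PySem.Chars.count
  rw [if_neg (by simpa using hp)]
  simpa using count_go_eq_cnt p hp s.length s 0 (le_refl _)

theorem splitC_head_tail (c : Char) (l : List Char) :
    splitC c l = l.takeWhile (fun a => a ≠ c) :: (splitC c l).tail := by
  induction l with
  | nil => simp [splitC]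
  | cons a t ih =>
    by_cases h : a = c
    · simp [splitC, h]
    · simp only [splitC, if_neg h]
      rw [ih]
      simp [h]

theorem splitOn_go_eq_splitC (c : Char) :
    ∀ (fuel : Nat) (l cur : List Char) (acc : List (List Char)), l.length < fuel →
      PySem.Chars.splitOn.go [c] fuel l cur acc =
        acc.reverse ++ (splitC c l).modifyHead (cur.reverse ++ ·) := by
  intro fuel
  induction fuel with
  | zero => intro l cur acc hl; omega
  | succ n ih =>
    intro l cur acc hl
    match l with
    | [] => rw [PySem.Chars.splitOn.go.eq_def]; simp [splitC]
    | a :: t =>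
      rw [PySem.Chars.splitOn.go.eq_def]
      simp only []
      by_cases h : a = c
      · rw [if_pos (by simp [h])]
        rw [ih _ _ _ (by simp at hl ⊢; omega)]
        subst h
        have hmod : ∀ (L : List (List Char)), List.modifyHead (fun x => x) L = L := by
          intro L; cases L <;> rfl
        simp [splitC, hmod]
      · rw [if_neg (by simp [List.isPrefixOf]; intro he; exact absurd he.symm h)]
        rw [ih _ _ _ (by simp at hl ⊢; omega)]
        simp only [splitC, if_neg h]
        rw [splitC_head_tail c t]
        simp

theorem splitOn_eq_splitC (s : List Char) (c : Char) :
    PySem.Chars.splitOn s [c] = splitC c s := by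
  unfold PySem.Chars.splitOn
  rw [splitOn_go_eq_splitC c (s.length + 1) s [] [] (by omega)]
  rw [splitC_head_tail]
  simp

theorem splitC_no_mem (c : Char) (l : List Char) (h : c ∉ l) : splitC c l = [l] := by
  induction l with
  | nil => simp [splitC]
  | cons a t ih =>
    simp at h
    simp only [splitC]
    rw [if_neg (fun he => h.1 he.symm), ih h.2]
    rfl

theorem splitC_append_cons (c : Char) (u v : List Char) (hu : c ∉ u) :
    splitC c (u ++ c :: v) = u :: splitC c v := by
  induction u with
  | nil => simp [splitC]
  | cons a t ih =>
    simp at hu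
    simp only [List.cons_append, splitC, ih hu.2]
    rw [if_neg (fun he => hu.1 he.symm)]
    rfl

-- the FIRST occurrence of c in s splits s as u ++ c :: v with c ∉ u
theorem first_occ (c : Char) (s : List Char) (h : c ∈ s) :
    ∃ u v, s = u ++ c :: v ∧ c ∉ u := by
  induction s with
  | nil => cases h
  | cons a t ih =>
    by_cases ha : a = c
    · exact ⟨[], t, by simp [ha], by simp⟩
    · have hct : c ∈ t := by
        cases List.mem_cons.mp h with
        | inl he => exact absurd he.symm ha
        | inr ht => exact ht
      obtain ⟨u, v, h1, h2⟩ := ih hct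
      exact ⟨a :: u, v, by simp [h1], by
        simp only [List.mem_cons, not_or]
        exact ⟨fun he => ha he.symm, h2⟩⟩

theorem prefix_of_append_cons {p u v : List Char} {c : Char} (hcp : c ∉ p)
    (h : p <+: (u ++ c :: v)) : p <+: u := by
  by_cases hlen : p.length ≤ u.length
  · have : p = (u ++ c :: v).take p.length := by
      rw [List.prefix_iff_eq_take] at h; exact h
    rw [List.take_append_of_le_length hlen] at this
    rw [this]
    exact List.take_prefix _ _
  · exfalso
    apply hcp
    have hu : u.length < p.length := by omega
    have hget : (u ++ c :: v)[u.length]'(by simp) = c := by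
      rw [List.getElem_append_right (le_refl _)]
      simp
    have hpi := h.getElem (i := u.length) (by omega)
    have hc : p[u.length]'(by omega) = c := by rw [hpi]; exact hget
    exact hc ▸ List.getElem_mem _

theorem cnt_skip (b : Char) (q u v : List Char) (hb : b ∉ u) :
    cnt (b :: q) (u ++ v) = cnt (b :: q) v := by
  induction u with
  | nil => simp
  | cons a t ih =>
    simp at hb
    have hnp : ¬ (b :: q).isPrefixOf (a :: (t ++ v)) := by
      simp only [List.isPrefixOf, Bool.and_eq_true, beq_iff_eq]
      intro hh
      exact hb.1 hh.1
    simp only [List.cons_append, cnt]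
    rw [if_neg hnp]
    exact ih hb.2

theorem cnt_not_mem (b : Char) (q s : List Char) (hb : b ∉ s) : cnt (b :: q) s = 0 := by
  have := cnt_skip b q s [] hb
  simpa [cnt] using this

theorem cnt_append_cons (p : List Char) (hp : p ≠ []) (c : Char) (hcp : c ∉ p) :
    ∀ (u v : List Char), c ∉ u → cnt p (u ++ c :: v) = cnt p u + cnt p v := by
  intro u
  induction u using cnt.induct p with
  | case1 =>
    intro v _
    obtain ⟨b, q, rfl⟩ : ∃ b q, p = b :: q := by
      cases p with
      | nil => exact absurd rfl hp
      | cons b q => exact ⟨b, q, rfl⟩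
    simp at hcp
    have : cnt (b :: q) (c :: v) = cnt (b :: q) v := by
      have h := cnt_skip b q [c] v (by
        simp only [List.mem_singleton]
        intro hh; exact hcp.1 hh.symm)
      simpa using h
    simp [this, cnt]
  | case2 a t hpre ih =>
    intro v hcu
    simp at hcu
    have hpre' : p.isPrefixOf (a :: (t ++ c :: v)) := by
      have h1 : p <+: (a :: t) := List.isPrefixOf_iff_prefix.mp hpre
      have : p <+: (a :: t) ++ (c :: v) := h1.trans (List.prefix_append _ _)
      simpa using List.isPrefixOf_iff_prefix.mpr this
    have hlen : p.length ≤ t.length + 1 := by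
      have := (List.isPrefixOf_iff_prefix.mp hpre).length_le
      simpa using this
    have hdrop : (t ++ c :: v).drop (p.length - 1) = t.drop (p.length - 1) ++ c :: v := by
      rw [List.drop_append_of_le_length (by omega)]
    simp only [List.cons_append, cnt, hpre', if_pos, hdrop]
    rw [ih v (fun h => hcu.2 (List.mem_of_mem_drop h))]
    simp [hpre]
    omega
  | case3 a t hpre ih =>
    intro v hcu
    simp at hcu
    have hpre' : ¬ p.isPrefixOf (a :: (t ++ c :: v)) := by
      intro h
      apply hpre
      have h1 : p <+: a :: (t ++ c :: v) := List.isPrefixOf_iff_prefix.mp h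
      have h2 : p <+: (a :: t) := by
        have := prefix_of_append_cons hcp (by simpa using h1 : p <+: ((a :: t) ++ c :: v))
        exact this
      exact List.isPrefixOf_iff_prefix.mpr h2
    simp only [List.cons_append, cnt]
    rw [if_neg hpre']
    rw [ih v hcu.2]
    simp [hpre]

theorem cnt_splitC (p : List Char) (hp : p ≠ []) (c : Char) (hcp : c ∉ p) :
    ∀ (n : Nat) (s : List Char), s.count c = n →
      cnt p s = ((splitC c s).map (cnt p)).sum := by
  intro n
  induction n with
  | zero =>
    intro s hs
    have hns : c ∉ s := by
      rw [← List.count_pos_iff]; omega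
    rw [splitC_no_mem c s hns]; simp
  | succ n ih =>
    intro s hs
    have hcs : c ∈ s := by rw [← List.count_pos_iff]; omega
    obtain ⟨u, v, hs', hcu⟩ := first_occ c s hcs
    have hvcount : v.count c = n := by
      rw [hs'] at hs
      rw [List.count_append, List.count_cons_self, List.count_eq_zero.mpr hcu] at hs
      omega
    rw [hs', cnt_append_cons p hp c hcp u v hcu, splitC_append_cons c u v hcu]
    simp [ih v hvcount]

-- prefix test against the first line = prefix test against the whole string
theorem prefix_takeWhile (c : Char) (q : List Char) (hcq : c ∉ q) :
    ∀ (s : List Char), q.isPrefixOf (s.takeWhile (fun a => a ≠ c)) = q.isPrefixOf s := by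
  induction q with
  | nil => intro s; simp [List.isPrefixOf]
  | cons a q' ih =>
    intro s
    simp at hcq
    cases s with
    | nil => simp
    | cons b s' =>
      by_cases hb : b = c
      · subst hb
        rw [List.takeWhile_cons]
        simp only [List.isPrefixOf]
        rw [if_neg (by simp)]
        simp only [List.isPrefixOf]
        simp
        intro hh
        exact absurd hh.symm hcq.1
      · rw [List.takeWhile_cons]
        rw [if_pos (by simpa using hb)]
        simp only [List.isPrefixOf]
        rw [ih hcq.2 s']

theorem cnt_cons_sep (c : Char) (q : List Char) (hcq : c ∉ q) (v : List Char) :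
    cnt (c :: q) (c :: v) = (if q.isPrefixOf v then 1 else 0) + cnt (c :: q) v := by
  by_cases h : q.isPrefixOf v
  · have hpre : (c :: q).isPrefixOf (c :: v) := by
      simp [List.isPrefixOf, h]
    have hql : q.length ≤ v.length := (List.isPrefixOf_iff_prefix.mp h).length_le
    have hvtake : v = q ++ v.drop q.length := by
      have h2 := (List.isPrefixOf_iff_prefix.mp h)
      rw [List.prefix_iff_eq_take] at h2
      conv_lhs => rw [← List.take_append_drop q.length v, ← h2]
    have hskip : cnt (c :: q) v = cnt (c :: q) (v.drop q.length) := by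
      conv_lhs => rw [hvtake]
      exact cnt_skip c q q (v.drop q.length) hcq
    simp only [cnt]
    rw [if_pos hpre, if_pos h, hskip]
    simp
  · have hpre : ¬ (c :: q).isPrefixOf (c :: v) := by
      simp only [List.isPrefixOf, Bool.and_eq_true, beq_iff_eq]
      intro hh; exact h hh.2
    simp only [cnt]
    rw [if_neg hpre, if_neg h]
    simp

theorem cnt_sep_splitC (c : Char) (q : List Char) (hcq : c ∉ q) :
    ∀ (n : Nat) (s : List Char), s.count c = n →
      cnt (c :: q) s = ((splitC c s).tail.countP (fun l => q.isPrefixOf l)) := by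
  intro n
  induction n with
  | zero =>
    intro s hs
    have hns : c ∉ s := by rw [← List.count_pos_iff]; omega
    rw [cnt_not_mem c q s hns, splitC_no_mem c s hns]
    simp
  | succ n ih =>
    intro s hs
    have hcs : c ∈ s := by rw [← List.count_pos_iff]; omega
    obtain ⟨u, v, hs', hcu⟩ := first_occ c s hcs
    have hvcount : v.count c = n := by
      rw [hs'] at hs
      rw [List.count_append, List.count_cons_self, List.count_eq_zero.mpr hcu] at hs
      omega
    rw [hs', cnt_skip c q u (c :: v) hcu, cnt_cons_sep c q hcq v,
        splitC_append_cons c u v hcu, ih v hvcount]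
    rw [List.tail_cons]
    conv_rhs => rw [splitC_head_tail c v]
    rw [List.countP_cons]
    rw [prefix_takeWhile c q hcq v]
    omega

theorem upperChar_ne_newline (c : Char) (h : c ≠ '\n') :
    PySem.Chars.upperChar c ≠ '\n' := by
  unfold PySem.Chars.upperChar
  split
  · rename_i hl
    simp [PySem.Chars.islower] at hl
    obtain ⟨h1, h2⟩ := hl
    have h97 : 97 ≤ c.toNat := h1
    have h122 : c.toNat ≤ 122 := h2
    intro he
    have hx : (Char.ofNat (c.toNat - 32)).toNat = ('\n').toNat := by rw [he]
    rw [Char.toNat_ofNat, if_pos (Or.inl (by omega))] at hx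
    have h10 : ('\n').toNat = 10 := by decide
    omega
  · exact h

theorem upper_splitC (s : List Char) :
    splitC '\n' (PySem.Chars.upper s) = (splitC '\n' s).map PySem.Chars.upper := by
  induction s with
  | nil => simp [splitC, PySem.Chars.upper]
  | cons a t ih =>
    by_cases h : a = '\n'
    · subst h
      have hup : PySem.Chars.upperChar '\n' = '\n' := by decide
      simp only [PySem.Chars.upper] at ih ⊢
      simp [splitC, hup, ih, PySem.Chars.upper]
    · have hup : PySem.Chars.upperChar a ≠ '\n' := upperChar_ne_newline a h
      simp only [PySem.Chars.upper, List.map_cons] at ih ⊢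
      simp only [splitC, if_neg h, if_neg hup, ih]
      rw [splitC_head_tail '\n' t]
      simp [PySem.Chars.upper]

-- the single-pass fold of port B, componentwise
theorem fold_lines (lines : List String) (a b c d e f g h : Int) :
    lines.foldl
      (fun (acc : Int × Int × Int × Int × Int × Int × Int × Int) line =>
        let s := PySem.Str.strip line
        let u := PySem.Str.upper line
        (acc.1 + 1,
         acc.2.1 + (if PySem.Str.startswith s "#" then 1 else 0),
         acc.2.2.1 + (if s == "" then 1 else 0),
         acc.2.2.2.1 + (PySem.Str.count u "DB(" : Int),
         acc.2.2.2.2.1 + (if PySem.Str.isIn "FEEDERS" u then 1 else 0),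
         acc.2.2.2.2.2.1 + (if PySem.Str.startswith u "IF(" then 1 else 0),
         acc.2.2.2.2.2.2.1 + (PySem.Str.count u "STET" : Int),
         acc.2.2.2.2.2.2.2 + (PySem.Str.count u "SKIP" : Int)))
      (a, b, c, d, e, f, g, h) =
    (a + lines.length,
     b + (lines.countP (fun l => PySem.Str.startswith (PySem.Str.strip l) "#") : Int),
     c + (lines.countP (fun l => PySem.Str.strip l == "") : Int),
     d + (lines.map (fun l => (PySem.Str.count (PySem.Str.upper l) "DB(" : Int))).sum,
     e + (lines.countP (fun l => PySem.Str.isIn "FEEDERS" (PySem.Str.upper l)) : Int),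
     f + (lines.countP (fun l => PySem.Str.startswith (PySem.Str.upper l) "IF(") : Int),
     g + (lines.map (fun l => (PySem.Str.count (PySem.Str.upper l) "STET" : Int))).sum,
     h + (lines.map (fun l => (PySem.Str.count (PySem.Str.upper l) "SKIP" : Int))).sum) := by
  induction lines generalizing a b c d e f g h with
  | nil => simp
  | cons x xs ih =>
    simp only [List.foldl_cons, ih, List.countP_cons, List.map_cons, List.sum_cons,
      List.length_cons]
    refine Prod.ext ?_ (Prod.ext ?_ (Prod.ext ?_ (Prod.ext ?_ (Prod.ext ?_ (Prod.ext ?_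
      (Prod.ext ?_ ?_)))))) <;> push_cast <;> ring


-- whole-text substring count (on the uppercased text) = sum of per-line counts
theorem count_upper_lines (s p : List Char) (hp : p ≠ []) (hnp : '\n' ∉ p) :
    ((PySem.Chars.count (PySem.Chars.upper s) p : Nat) : Int)
      = ((splitC '\n' s).map
          (fun l => ((PySem.Chars.count (PySem.Chars.upper l) p : Nat) : Int))).sum := by
  rw [count_eq_cnt _ p hp, cnt_splitC p hp '\n' hnp _ _ rfl, upper_splitC, List.map_map]
  rw [Nat.cast_list_sum, List.map_map]
  congr 1
  apply List.map_congr_left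
  intro l _
  simp [Function.comp, count_eq_cnt _ p hp]

-- whole-text '\n'-anchored count + startswith = number of lines starting with the pattern
theorem ifs_chars (s : List Char) :
    ((PySem.Chars.count (PySem.Chars.upper s) ('\n' :: "IF(".toList) : Nat) : Int)
      + (if "IF(".toList.isPrefixOf (PySem.Chars.upper s) then (1 : Int) else 0)
      = (((splitC '\n' s).countP (fun l => "IF(".toList.isPrefixOf (PySem.Chars.upper l)) : Nat) : Int) := by
  set q : List Char := "IF(".toList with hqdef
  have hq : q ≠ [] := by decide
  have hnq : '\n' ∉ q := by decide
  have hcount : PySem.Chars.count (PySem.Chars.upper s) ('\n' :: q)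
      = (splitC '\n' (PySem.Chars.upper s)).tail.countP (fun l => q.isPrefixOf l) := by
    rw [count_eq_cnt _ _ (by simp), cnt_sep_splitC '\n' q hnq _ _ rfl]
  have htails : (splitC '\n' (PySem.Chars.upper s)).tail.countP (fun l => q.isPrefixOf l)
      = (splitC '\n' s).tail.countP (fun l => q.isPrefixOf (PySem.Chars.upper l)) := by
    rw [upper_splitC, ← List.map_tail, List.countP_map]
    rfl
  have hheadeq : List.takeWhile (fun a => a ≠ '\n') (PySem.Chars.upper s)
      = PySem.Chars.upper (List.takeWhile (fun a => a ≠ '\n') s) := by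
    have h1 := splitC_head_tail '\n' (PySem.Chars.upper s)
    rw [upper_splitC] at h1
    conv_lhs at h1 => rw [splitC_head_tail '\n' s]
    simpa using (List.head_eq_of_cons_eq h1.symm)
  have hstart : q.isPrefixOf (PySem.Chars.upper s)
      = q.isPrefixOf (PySem.Chars.upper (List.takeWhile (fun a => a ≠ '\n') s)) := by
    rw [← hheadeq, prefix_takeWhile '\n' q hnq]
  have hwhole : (splitC '\n' s).countP (fun l => q.isPrefixOf (PySem.Chars.upper l))
      = (splitC '\n' s).tail.countP (fun l => q.isPrefixOf (PySem.Chars.upper l))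
        + (if q.isPrefixOf (PySem.Chars.upper s) then 1 else 0) := by
    conv_lhs => rw [splitC_head_tail '\n' s]
    rw [List.countP_cons, hstart]
  rw [hcount, htails, hwhole]
  push_cast
  by_cases hcc : q.isPrefixOf (PySem.Chars.upper s) <;> simp [hcc]

-- the split expression shared by both ports, as a char-level split
theorem lines_eq (rt : String) :
    (PySem.Str.split? rt "\n").getD [] = List.map String.ofList (splitC '\n' rt.toList) := by
  simp [PySem.Str.split?, PySem.Chars.split?]
  rw [splitOn_eq_splitC]

-- ===== VERDICT (by name: the statement is the Claim_ definition above) =====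
set_option maxHeartbeats 1600000 in
theorem analyse_rules_spec : Claim_equal_analyse_rules := by
  intro rt _
  unfold Spec_analyse_rules analyse_rules analyse_rules_alt
  by_cases h : rt = ""
  · simp [h]
  · rw [if_neg h, if_neg h]
    rw [fold_lines]
    simp only [zero_add]
    have hdb := count_upper_lines rt.toList "DB(".toList (by decide) (by decide)
    have hstet := count_upper_lines rt.toList "STET".toList (by decide) (by decide)
    have hskip := count_upper_lines rt.toList "SKIP".toList (by decide) (by decide)
    have hifs := ifs_chars rt.toList
    rw [lines_eq]
    have Hdb : ((PySem.Str.count (PySem.Str.upper rt) "DB(" : Nat) : Int)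
        = (List.map (fun l => ((PySem.Str.count (PySem.Str.upper l) "DB(" : Nat) : Int))
            (List.map String.ofList (splitC '\n' rt.toList))).sum := by
      have h1 : PySem.Str.count (PySem.Str.upper rt) "DB("
          = PySem.Chars.count (PySem.Chars.upper rt.toList) "DB(".toList := by
        simp [PySem.Str.count, PySem.Str.upper]
      rw [h1, hdb, List.map_map]
      congr 1
      apply List.map_congr_left
      intro l _
      simp [Function.comp]
    have Hstet : ((PySem.Str.count (PySem.Str.upper rt) "STET" : Nat) : Int)
        = (List.map (fun l => ((PySem.Str.count (PySem.Str.upper l) "STET" : Nat) : Int))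
            (List.map String.ofList (splitC '\n' rt.toList))).sum := by
      have h1 : PySem.Str.count (PySem.Str.upper rt) "STET"
          = PySem.Chars.count (PySem.Chars.upper rt.toList) "STET".toList := by
        simp [PySem.Str.count, PySem.Str.upper]
      rw [h1, hstet, List.map_map]
      congr 1
      apply List.map_congr_left
      intro l _
      simp [Function.comp]
    have Hskip : ((PySem.Str.count (PySem.Str.upper rt) "SKIP" : Nat) : Int)
        = (List.map (fun l => ((PySem.Str.count (PySem.Str.upper l) "SKIP" : Nat) : Int))
            (List.map String.ofList (splitC '\n' rt.toList))).sum := by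
      have h1 : PySem.Str.count (PySem.Str.upper rt) "SKIP"
          = PySem.Chars.count (PySem.Chars.upper rt.toList) "SKIP".toList := by
        simp [PySem.Str.count, PySem.Str.upper]
      rw [h1, hskip, List.map_map]
      congr 1
      apply List.map_congr_left
      intro l _
      simp [Function.comp]
    have Hifs : ((PySem.Str.count (PySem.Str.upper rt) "\nIF(" : Nat) : Int)
          + (if PySem.Str.startswith (PySem.Str.upper rt) "IF(" = true then (1 : Int) else 0)
        = ((List.countP (fun l => PySem.Str.startswith (PySem.Str.upper l) "IF(")
            (List.map String.ofList (splitC '\n' rt.toList)) : Nat) : Int) := by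
      have h1 : PySem.Str.count (PySem.Str.upper rt) "\nIF("
          = PySem.Chars.count (PySem.Chars.upper rt.toList) ('\n' :: "IF(".toList) := by
        have hl : ("\nIF(" : String).toList = '\n' :: "IF(".toList := by decide
        simp [PySem.Str.count, PySem.Str.upper, hl]
      have h2 : PySem.Str.startswith (PySem.Str.upper rt) "IF("
          = "IF(".toList.isPrefixOf (PySem.Chars.upper rt.toList) := by
        simp [PySem.Str.startswith, PySem.Str.upper, PySem.Chars.startswith]
      rw [h1, h2, hifs, List.countP_map]
      congr 1
      apply List.countP_congr
      intro l _
      simp [Function.comp, PySem.Chars.startswith, List.isPrefixOf_iff_prefix]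
    rw [Hdb, Hstet, Hskip, Hifs]
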